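-- pv_equiv track=rewrite | github.com/kataph/first-order-model-checker | check_by_range_restriction.py | satisfies_equalities
-- ===== SOURCE A (Python) =====
-- def satisfies_equalities(header: tuple[str], tup: tuple) -> bool:
--     """Given a header with some repetitions and a tuple (if no restriction ir returns true), it checks if the tuple reproduces the repetitions"""
--     if not len(header) == len(tup):
--         raise TypeError(f"The header {header} should have the same length as the input tuple {tup}")
--     var_to_value = {}
--     for i, var in enumerate(header):
--         if not var in var_to_value:
--             var_to_value.update({var:tup[i]})
--         else:
--             if not var_to_value[var] == tup[i]:
--                 return False
--     return True
-- ===== SOURCE B (Python) =====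
-- def satisfies_equalities(header: tuple, tup: tuple) -> bool:
--     """Build the variable->value map in one shot (last value wins) and
--     check the tuple it reconstructs equals the input tuple."""
--     if not len(header) == len(tup):
--         raise TypeError(f"The header {header} should have the same length as the input tuple {tup}")
--     d = dict(zip(header, tup))
--     return tuple(d[h] for h in header) == tup
-- ===== Notes on version B (the rewrite author's own statement) =====
-- stated objective: simpler
-- what changed: Instead of an interleaved first-occurrence insert/compare loop with early return, B builds the full variable->value map at once with dict(zip(...)) (last value wins) and compares the tuple reconstructed from the map against the input tuple.
import Mathlib
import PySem

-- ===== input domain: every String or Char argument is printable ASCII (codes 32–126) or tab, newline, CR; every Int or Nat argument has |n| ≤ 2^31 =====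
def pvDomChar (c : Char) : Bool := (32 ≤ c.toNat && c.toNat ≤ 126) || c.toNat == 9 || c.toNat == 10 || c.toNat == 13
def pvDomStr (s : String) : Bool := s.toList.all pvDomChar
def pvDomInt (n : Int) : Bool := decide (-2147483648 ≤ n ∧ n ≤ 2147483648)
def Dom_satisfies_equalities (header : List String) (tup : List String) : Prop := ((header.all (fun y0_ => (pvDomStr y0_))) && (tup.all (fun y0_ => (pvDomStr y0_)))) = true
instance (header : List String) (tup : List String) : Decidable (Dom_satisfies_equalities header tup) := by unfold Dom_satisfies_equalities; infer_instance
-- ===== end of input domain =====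

-- B builds the whole variable→value map at once (last value wins) and compares the
-- tuple reconstructed from it with the input tuple, instead of A's interleaved
-- first-occurrence insert/compare loop with early return; objective: simpler.

-- ===== PORT A =====
-- A's loop: keep the FIRST value seen for each variable; on a repeated variable
-- compare against the stored value, returning False on the first mismatch.
def pvALoop : List (String × String) → PySem.Dict String String → Bool
  | [], _ => true
  | (var, t) :: rest, d =>
    if !(d.contains var) then
      pvALoop rest (d.insert var t)
    else
      if !((d.get? var).getD "" == t) then false
      else pvALoop rest d

-- Python A raises TypeError on unequal lengths; those inputs are outside Pre_
def satisfies_equalities (header : List String) (tup : List String) : Bool :=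
  if header.length == tup.length then pvALoop (header.zip tup) PySem.Dict.empty
  else false

-- ===== PORT B =====
-- dict(zip(header, tup)): insert every pair, later values overwrite earlier ones
def pvLastDict (pairs : List (String × String)) : PySem.Dict String String :=
  pairs.foldl (fun d p => d.insert p.1 p.2) PySem.Dict.empty

def satisfies_equalities_alt (header : List String) (tup : List String) : Bool :=
  if header.length == tup.length then
    -- d[h] never raises: every h ∈ header is a key of d; getD with "" is exact here
    (header.map (fun h => (pvLastDict (header.zip tup)).getD h "")) == tup
  else false

-- ===== PRECONDITION & SPEC =====
-- Pre_ excludes exactly the inputs of unequal length, on which Python A raises TypeError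
def Pre_satisfies_equalities (header : List String) (tup : List String) : Prop :=
  header.length = tup.length
instance (header : List String) (tup : List String) : Decidable (Pre_satisfies_equalities header tup) := by unfold Pre_satisfies_equalities; infer_instance
def pvWitness_satisfies_equalities : List String × List String := (["x", "y", "x"], ["a", "b", "a"])

def Spec_satisfies_equalities (header : List String) (tup : List String) (out : Bool) : Prop := out = satisfies_equalities_alt header tup
instance (header : List String) (tup : List String) (out : Bool) : Decidable (Spec_satisfies_equalities header tup out) := by unfold Spec_satisfies_equalities; infer_instance

-- ===== CLAIM (what is proved, stated in full; the proofs are below) =====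
def Claim_equal_satisfies_equalities : Prop := ∀ (header : List String) (tup : List String), Dom_satisfies_equalities header tup → Pre_satisfies_equalities header tup → Spec_satisfies_equalities header tup (satisfies_equalities header tup)

-- ===== LEMMAS AND PROOFS =====

-- pair-list consistency: any two pairs with the same key carry the same value
def pvCons (l : List (String × String)) : Prop :=
  ∀ p ∈ l, ∀ q ∈ l, p.1 = q.1 → p.2 = q.2

-- the last value associated with a key in a pair list (later pairs win)
def pvLast? : List (String × String) → String → Option String
  | [], _ => none
  | (a, b) :: rest, k => (pvLast? rest k).or (if a = k then some b else none)

theorem pvALoop_iff (l : List (String × String)) (d : PySem.Dict String String) :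
    pvALoop l d = true ↔
      ((∀ p ∈ l, ∀ w, d.get? p.1 = some w → w = p.2) ∧ pvCons l) := by
  induction l generalizing d with
  | nil => simp [pvALoop, pvCons]
  | cons hd tl ih =>
    obtain ⟨a, b⟩ := hd
    by_cases hc : d.contains a = true
    · obtain ⟨w, hw⟩ : ∃ w, d.get? a = some w := by
        rw [PySem.Dict.contains_eq_isSome_get?] at hc
        exact Option.isSome_iff_exists.mp hc
      by_cases hwb : w = b
      · subst hwb
        rw [show pvALoop ((a, w) :: tl) d = pvALoop tl d by
          simp [pvALoop, hc, hw]]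
        rw [ih]
        constructor
        · rintro ⟨h1, h2⟩
          refine ⟨?_, ?_⟩
          · rintro p hp w' hw'
            rcases List.mem_cons.mp hp with h | h
            · subst h; simp only [hw, Option.some.injEq] at hw'; exact hw'.symm
            · exact h1 p h w' hw'
          · rintro p hp q hq hpq
            rcases List.mem_cons.mp hp with h | h <;> rcases List.mem_cons.mp hq with h' | h'
            · subst h; subst h'; rfl
            · subst h
              exact h1 q h' w (by rw [← hpq]; exact hw)
            · subst h'
              exact (h1 p h w (by rw [hpq]; exact hw)).symm
            · exact h2 p h q h' hpq
        · rintro ⟨h1, h2⟩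
          exact ⟨fun p hp => h1 p (List.mem_cons_of_mem _ hp),
                 fun p hp q hq => h2 p (List.mem_cons_of_mem _ hp) q (List.mem_cons_of_mem _ hq)⟩
      · rw [show pvALoop ((a, b) :: tl) d = false by
          simp [pvALoop, hc, hw, hwb]]
        simp only [Bool.false_eq_true, false_iff]
        rintro ⟨h1, _⟩
        exact hwb (h1 (a, b) List.mem_cons_self w hw)
    · have hn : d.get? a = none := by
        rw [PySem.Dict.contains_eq_isSome_get?] at hc
        simpa using hc
      rw [show pvALoop ((a, b) :: tl) d = pvALoop tl (d.insert a b) by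
        simp [pvALoop, hc]]
      rw [ih]
      constructor
      · rintro ⟨h1, h2⟩
        refine ⟨?_, ?_⟩
        · rintro p hp w hw'
          rcases List.mem_cons.mp hp with h | h
          · subst h; simp [hn] at hw'
          · by_cases hpa : p.1 = a
            · rw [hpa, hn] at hw'; exact absurd hw' (by simp)
            · exact h1 p h w (by rwa [PySem.Dict.get?_insert, if_neg hpa])
        · rintro p hp q hq hpq
          rcases List.mem_cons.mp hp with h | h <;> rcases List.mem_cons.mp hq with h' | h'
          · subst h; subst h'; rfl
          · subst h
            exact h1 q h' b (by rw [PySem.Dict.get?_insert, if_pos hpq.symm])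
          · subst h'
            exact (h1 p h b (by rw [PySem.Dict.get?_insert, if_pos hpq])).symm
          · exact h2 p h q h' hpq
      · rintro ⟨h1, h2⟩
        refine ⟨?_, ?_⟩
        · rintro p hp w hw'
          rw [PySem.Dict.get?_insert] at hw'
          by_cases hpa : p.1 = a
          · rw [if_pos hpa] at hw'
            have hb : w = b := by simpa using hw'.symm
            rw [hb]
            exact h2 (a, b) List.mem_cons_self p (List.mem_cons_of_mem _ hp) hpa.symm
          · rw [if_neg hpa] at hw'
            exact h1 p (List.mem_cons_of_mem _ hp) w hw'
        · exact fun p hp q hq => h2 p (List.mem_cons_of_mem _ hp) q (List.mem_cons_of_mem _ hq)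

-- lookup in the foldl-built dict = last occurrence in the pair list
theorem get?_foldl_insert (l : List (String × String)) (d : PySem.Dict String String) (k : String) :
    (l.foldl (fun d p => d.insert p.1 p.2) d).get? k = (pvLast? l k).or (d.get? k) := by
  induction l generalizing d with
  | nil => simp [pvLast?]
  | cons hd tl ih =>
    obtain ⟨a, b⟩ := hd
    rw [List.foldl_cons, ih, pvLast?, Option.or_assoc]
    congr 1
    rw [PySem.Dict.get?_insert]
    rcases eq_or_ne k a with h | h
    · subst h; simp
    · rw [if_neg h, if_neg (fun hk => h hk.symm), Option.none_or]

theorem get?_pvLastDict (l : List (String × String)) (k : String) :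
    (pvLastDict l).get? k = pvLast? l k := by
  rw [pvLastDict, get?_foldl_insert]
  simp

-- a computed last value really occurs in the list, paired with its key
theorem pvLast?_eq_some_mem (l : List (String × String)) (k v : String)
    (h : pvLast? l k = some v) : (k, v) ∈ l := by
  induction l with
  | nil => simp [pvLast?] at h
  | cons hd tl ih =>
    obtain ⟨a, b⟩ := hd
    rw [pvLast?] at h
    cases htl : pvLast? tl k with
    | some v' =>
      rw [htl, Option.some_or] at h
      cases h
      exact List.mem_cons_of_mem _ (ih htl)
    | none =>
      rw [htl, Option.none_or] at h
      by_cases ha : a = k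
      · rw [if_pos ha] at h
        cases h
        subst ha
        exact List.mem_cons_self
      · rw [if_neg ha] at h; cases h

-- every member's key has SOME last value, itself paired with that key in the list
theorem pvLast?_mem (l : List (String × String)) (p : String × String) (hp : p ∈ l) :
    ∃ v, pvLast? l p.1 = some v ∧ (p.1, v) ∈ l := by
  have hsome : ∃ v, pvLast? l p.1 = some v := by
    induction l with
    | nil => cases hp
    | cons hd tl ih =>
      obtain ⟨a, b⟩ := hd
      rw [pvLast?]
      cases htl : pvLast? tl p.1 with
      | some v => exact ⟨v, by simp⟩
      | none =>
        rcases List.mem_cons.mp hp with h | h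
        · refine ⟨b, ?_⟩
          rw [Option.none_or, if_pos (by rw [h])]
        · obtain ⟨v, hv⟩ := ih h
          rw [hv] at htl; cases htl
  obtain ⟨v, hv⟩ := hsome
  exact ⟨v, hv, pvLast?_eq_some_mem l p.1 v hv⟩

theorem pvCons_iff_last (l : List (String × String)) :
    pvCons l ↔ ∀ p ∈ l, pvLast? l p.1 = some p.2 := by
  constructor
  · intro hc p hp
    obtain ⟨v, hv, hmem⟩ := pvLast?_mem l p hp
    rw [hv]
    exact congrArg some (hc (p.1, v) hmem p hp rfl)
  · intro h p hp q hq hpq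
    have h1 := h p hp
    have h2 := h q hq
    rw [← hpq] at h2
    rw [h1] at h2
    exact Option.some_injective _ h2

theorem map_eq_iff_zip (f : String → String) (h t : List String) (hlen : h.length = t.length) :
    h.map f = t ↔ ∀ p ∈ h.zip t, f p.1 = p.2 := by
  induction h generalizing t with
  | nil => cases t with
    | nil => simp
    | cons _ _ => simp at hlen
  | cons a h' ih =>
    cases t with
    | nil => simp at hlen
    | cons b t' =>
      simp only [List.map_cons, List.cons.injEq, List.zip_cons_cons, List.mem_cons]
      rw [ih t' (by simpa using hlen)]
      constructor
      · rintro ⟨h1, h2⟩ p hp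
        rcases hp with h | h
        · subst h; exact h1
        · exact h2 p h
      · intro hh
        exact ⟨hh (a, b) (Or.inl rfl), fun p hp => hh p (Or.inr hp)⟩

-- ===== VERDICT (by name: the statement is the Claim_ definition above) =====
theorem satisfies_equalities_spec : Claim_equal_satisfies_equalities := by
  intro header tup _ hpre
  have hlen : header.length = tup.length := hpre
  unfold Spec_satisfies_equalities satisfies_equalities satisfies_equalities_alt
  rw [if_pos (beq_iff_eq.mpr hlen), if_pos (beq_iff_eq.mpr hlen)]
  rw [Bool.eq_iff_iff, pvALoop_iff, beq_iff_eq,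
      map_eq_iff_zip _ _ _ hlen]
  have hzip : ∀ p ∈ header.zip tup,
      ((pvLastDict (header.zip tup)).getD p.1 "" = p.2 ↔ pvLast? (header.zip tup) p.1 = some p.2) := by
    intro p hp
    obtain ⟨v, hv, _⟩ := pvLast?_mem _ p hp
    rw [PySem.Dict.getD_eq_get?_getD, get?_pvLastDict, hv, Option.getD_some,
        Option.some.injEq]
  constructor
  · rintro ⟨_, hc⟩ p hp
    exact (hzip p hp).mpr ((pvCons_iff_last _).mp hc p hp)
  · intro hh
    refine ⟨fun p _ w hw => by simp [PySem.Dict.get?_empty] at hw, ?_⟩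
    exact (pvCons_iff_last _).mpr (fun p hp => (hzip p hp).mp (hh p hp))
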